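-- pv_equiv track=rewrite | github.com/shenbagabalan/pythonpgms | 1ask.py | check
-- ===== SOURCE A (Python) =====
-- def check(l):
--         ch=1
--         for v in range(0,len(l)-1):
--                 if l[v]!=l[v+1]:
--                         ch=ch+1
--                 else:
--                     break
--         return ch
-- ===== SOURCE B (Python) =====
-- from itertools import groupby
--
-- def check(l):
--     off = 0
--     for _, g in groupby(l):
--         n = len(list(g))
--         if n >= 2:
--             return off + 1
--         off += n
--     return max(1, len(l))
-- ===== Notes on version B (the rewrite author's own statement) =====
-- stated objective: idiomatic
-- what changed: Replaced the index-based adjacent-pair scan with a break by an itertools.groupby traversal of consecutive-equal runs that accumulates an offset and returns at the first run of length >= 2, with max(1, len(l)) as the no-duplicate default.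
import Mathlib
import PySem

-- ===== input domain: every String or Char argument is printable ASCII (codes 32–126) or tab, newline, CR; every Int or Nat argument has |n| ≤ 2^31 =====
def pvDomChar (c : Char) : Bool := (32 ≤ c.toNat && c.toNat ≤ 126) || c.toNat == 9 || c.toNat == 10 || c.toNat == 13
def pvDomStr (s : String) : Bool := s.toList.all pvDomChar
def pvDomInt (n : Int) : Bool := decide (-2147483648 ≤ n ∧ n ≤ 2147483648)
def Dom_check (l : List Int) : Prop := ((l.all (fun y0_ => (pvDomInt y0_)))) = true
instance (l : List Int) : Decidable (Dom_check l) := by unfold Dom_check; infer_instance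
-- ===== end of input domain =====

-- B rewrites A's indexed adjacent-pair scan as an itertools.groupby-style traversal of
-- consecutive-equal runs with a running offset (idiomatic; same cost).

-- ===== PORT A =====
-- for v in range(0, len(l)-1): if l[v] != l[v+1]: ch += 1 else: break
def checkGo (l : List Int) : List Int → Int → Int
  | [], ch => ch
  | v :: vs, ch =>
      if PySem.List.pyGet? l v ≠ PySem.List.pyGet? l (v + 1) then checkGo l vs (ch + 1)
      else ch

def check (l : List Int) : Int :=
  checkGo l (PySem.List.pyRange 0 ((l.length : Int) - 1) 1) 1

-- ===== PORT B =====
-- hand-ported itertools.groupby for equality: splits a list into maximal runs of equal elements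
def runs : List Int → List (List Int)
  | [] => []
  | [x] => [[x]]
  | x :: y :: r =>
      match runs (y :: r) with
      | [] => [[x]]
      | g :: gs => if x = y then (x :: g) :: gs else [x] :: g :: gs

-- loop over groups, accumulating the offset; the final return is max(1, len(l))
def checkAltGo (n : Int) : Int → List (List Int) → Int
  | _, [] => max 1 n
  | off, g :: gs => if 2 ≤ (g.length : Int) then off + 1 else checkAltGo n (off + (g.length : Int)) gs

def check_alt (l : List Int) : Int :=
  checkAltGo (l.length : Int) 0 (runs l)

-- ===== PRECONDITION & SPEC =====
def Spec_check (l : List Int) (out : Int) : Prop := out = check_alt l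
instance (l : List Int) (out : Int) : Decidable (Spec_check l out) := by unfold Spec_check; infer_instance

-- ===== CLAIM (what is proved, stated in full; the proofs are below) =====
def Claim_equal_check : Prop := ∀ (l : List Int), Dom_check l → Spec_check l (check l)

-- ===== LEMMAS AND PROOFS =====

-- number of distinct adjacent pairs before the first equal pair
def gSpec : List Int → Int
  | [] => 0
  | [_] => 0
  | x :: y :: r => if x = y then 0 else 1 + gSpec (y :: r)

-- does the list contain an adjacent equal pair?
def hasAdj : List Int → Bool
  | [] => false
  | [_] => false
  | x :: y :: r => x = y || hasAdj (y :: r)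

theorem gSpec_short (m : List Int) (h : m.length ≤ 1) : gSpec m = 0 := by
  match m with
  | [] => rfl
  | [_] => rfl
  | _ :: _ :: _ => simp at h

theorem checkGo_drop (l : List Int) (k : Nat) (ch : Int) :
    checkGo l (PySem.List.pyRange (k : Int) ((l.length : Int) - 1) 1) ch
      = ch + gSpec (l.drop k) := by
  by_cases hk : (l.length : Int) - 1 ≤ (k : Int)
  · rw [PySem.List.pyRange_one_eq_nil hk]
    have : (l.drop k).length ≤ 1 := by
      rw [List.length_drop]; omega
    simp [checkGo, gSpec_short _ this]
  · rw [not_le] at hk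
    have hk1 : k + 1 < l.length := by omega
    rw [PySem.List.pyRange_one_cons (by omega)]
    have hcast : (k : Int) + 1 = ((k + 1 : Nat) : Int) := by push_cast; ring
    have h1 : PySem.List.pyGet? l (k : Int) = some l[k] := by
      rw [PySem.List.pyGet?_natCast]; simp
    have h2 : PySem.List.pyGet? l ((k : Int) + 1) = some l[k+1] := by
      rw [hcast, PySem.List.pyGet?_natCast]; simp [List.getElem?_eq_getElem hk1]
    have hdrop : l.drop k = l[k] :: l[k+1] :: l.drop (k + 2) := by
      rw [List.drop_eq_getElem_cons (by omega), List.drop_eq_getElem_cons hk1]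
    have hdrop1 : l.drop (k + 1) = l[k+1] :: l.drop (k + 2) := by
      rw [List.drop_eq_getElem_cons hk1]
    show checkGo l ((k : Int) :: PySem.List.pyRange ((k : Int) + 1) ((l.length : Int) - 1) 1) ch
        = ch + gSpec (l.drop k)
    rw [checkGo, h1, h2, hdrop, gSpec]
    by_cases heq : l[k] = l[k+1]
    · simp [heq]
    · have ih := checkGo_drop l (k + 1) (ch + 1)
      rw [if_pos (show some l[k] ≠ some l[k+1] by simp [heq]), if_neg heq, hcast, ih, hdrop1]
      ring
termination_by l.length - k

theorem check_eq_gSpec (l : List Int) : check l = 1 + gSpec l := by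
  have := checkGo_drop l 0 1
  simpa [check] using this

theorem runs_ne_nil (m : List Int) (h : m ≠ []) : runs m ≠ [] := by
  match m with
  | [x] => simp [runs]
  | x :: y :: r =>
      rw [runs]
      cases hr : runs (y :: r) with
      | nil => simp
      | cons g gs => dsimp only; split <;> simp

theorem runs_groups_ne_nil (m : List Int) : ∀ g ∈ runs m, g ≠ [] := by
  match m with
  | [] => simp [runs]
  | [x] => simp [runs]
  | x :: y :: r =>
      intro g hg
      rw [runs] at hg
      have ih := runs_groups_ne_nil (y :: r)
      cases hr : runs (y :: r) with
      | nil => rw [hr] at hg; simp at hg; simp [hg]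
      | cons g0 gs =>
          rw [hr] at hg; dsimp only at hg
          split at hg <;> rcases List.mem_cons.mp hg with h | h
          · simp [h]
          · exact ih g (by rw [hr]; exact List.mem_cons_of_mem _ h)
          · simp [h]
          · exact ih g (by rw [hr]; exact h)

theorem checkAltGo_runs (m : List Int) (n off : Int) :
    checkAltGo n off (runs m) = if hasAdj m then off + 1 + gSpec m else max 1 n := by
  match m with
  | [] => simp [runs, checkAltGo, hasAdj]
  | [x] => simp [runs, checkAltGo, hasAdj]
  | x :: y :: r =>
      rw [runs]
      cases hr : runs (y :: r) with
      | nil => exact absurd hr (runs_ne_nil (y :: r) (by simp))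
      | cons g gs =>
          dsimp only
          have hgne : g ≠ [] := runs_groups_ne_nil (y :: r) g (hr ▸ List.mem_cons_self ..)
          have hglen : 1 ≤ g.length := List.length_pos_iff.mpr hgne
          by_cases heq : x = y
          · rw [if_pos heq]
            have : (2 : Int) ≤ ((x :: g).length : Int) := by simp; omega
            simp only [checkAltGo, if_pos this]
            simp [hasAdj, gSpec, heq]
          · rw [if_neg heq, checkAltGo]
            have h1 : ¬ (2 : Int) ≤ (([x] : List Int).length : Int) := by simp
            rw [if_neg h1]
            have hx : off + ((([x] : List Int).length : Nat) : Int) = off + 1 := by simp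
            have ih := checkAltGo_runs (y :: r) n (off + 1)
            rw [hr] at ih
            rw [hx, ih,
              show hasAdj (x :: y :: r) = hasAdj (y :: r) by simp [hasAdj, heq],
              show gSpec (x :: y :: r) = 1 + gSpec (y :: r) from by rw [gSpec, if_neg heq]]
            split
            · ring
            · rfl

theorem gSpec_no_adj (m : List Int) (h : hasAdj m = false) :
    1 + gSpec m = max 1 (m.length : Int) := by
  match m with
  | [] => simp [gSpec]
  | [x] => simp [gSpec]
  | x :: y :: r =>
      rw [hasAdj] at h
      simp only [Bool.or_eq_false_iff, decide_eq_false_iff_not] at h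
      obtain ⟨hxy, hrest⟩ := h
      have ih := gSpec_no_adj (y :: r) hrest
      rw [gSpec, if_neg hxy]
      have hlen : (1 : Int) ≤ ((y :: r).length : Int) := by simp
      rw [max_eq_right hlen] at ih
      have hmax : max 1 (((x :: y :: r).length : Int)) = ((x :: y :: r).length : Int) := by
        apply max_eq_right; simp; omega
      rw [hmax]
      simp only [List.length_cons] at *
      push_cast at *
      omega

-- ===== VERDICT (by name: the statement is the Claim_ definition above) =====
theorem check_spec : Claim_equal_check := by
  intro l _
  show check l = check_alt l
  rw [check_eq_gSpec, check_alt, checkAltGo_runs]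
  by_cases h : hasAdj l
  · simp [h]
  · rw [if_neg (by simp [h])]
    exact gSpec_no_adj l (by simpa using h)
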